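-- pv_equiv track=rewrite | github.com/RibanezQrClaim/voz | utils/summarizer.py | _first_meaningful_sentence
-- ===== SOURCE A (Python) =====
-- ABBR = {"sr.", "sra.", "dr.", "dra.", "ing.", "lic.", "ee.uu.", "p.ej.", "etc."}
--
-- def _first_meaningful_sentence(s: str) -> str:
--     if not s:
--         return s
--     buf = []
--     for i, ch in enumerate(s):
--         buf.append(ch)
--         if ch in ".!?":
--             frag = "".join(buf).strip()
--             tail = s[i+1:i+3].strip().lower()
--             last = frag.lower().split()[-1] if frag.split() else ""
--             if last in ABBR:
--                 continue
--             if ch == "." and tail[:1].isdigit():  # "v1.2" etc.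
--                 continue
--             return frag
--     return s.strip()
-- ===== SOURCE B (Python) =====
-- ABBR = {"sr.", "sra.", "dr.", "dra.", "ing.", "lic.", "ee.uu.", "p.ej.", "etc."}
--
-- def _first_meaningful_sentence(s: str) -> str:
--     # One pass: track the current (lowercased) token incrementally instead of
--     # re-joining and re-splitting the whole prefix at every delimiter.
--     word = ""
--     for i, ch in enumerate(s):
--         if ch.isspace():
--             word = ""
--         else:
--             word += ch.lower()
--         if ch in ".!?":
--             if word in ABBR:
--                 continue
--             if ch == ".":
--                 nxt = ""
--                 for c in s[i + 1:i + 3]: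
--                     if not c.isspace():
--                         nxt = c
--                         break
--                 if nxt.isdigit():
--                     continue
--             return s[:i + 1].strip()
--     return s.strip()
-- ===== Notes on version B (the rewrite author's own statement) =====
-- stated objective: alternative
-- what changed: Instead of accumulating the prefix in a list and doing join+strip+lower+split of the whole prefix at every delimiter, B keeps the current lowercased token incrementally in one pass and only slices/strips the prefix once, on return.
import Mathlib
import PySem

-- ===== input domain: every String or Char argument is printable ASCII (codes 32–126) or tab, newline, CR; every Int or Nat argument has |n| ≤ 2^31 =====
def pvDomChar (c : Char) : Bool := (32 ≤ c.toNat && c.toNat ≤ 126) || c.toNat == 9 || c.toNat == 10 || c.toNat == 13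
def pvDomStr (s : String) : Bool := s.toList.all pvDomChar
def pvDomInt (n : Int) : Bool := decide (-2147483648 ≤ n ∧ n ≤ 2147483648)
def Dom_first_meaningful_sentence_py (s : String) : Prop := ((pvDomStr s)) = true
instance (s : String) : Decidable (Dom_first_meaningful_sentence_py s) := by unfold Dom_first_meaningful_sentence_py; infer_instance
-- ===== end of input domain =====

-- B replaces A's per-delimiter join+strip+split of the whole prefix by a single pass that
-- maintains the current lowercased token incrementally (objective: alternative).

-- ===== PORT A =====

-- the module constant ABBR (a set of string literals, shared by both implementations)
def fmsABBR : List (List Char) :=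
  ["sr.".toList, "sra.".toList, "dr.".toList, "dra.".toList, "ing.".toList,
   "lic.".toList, "ee.uu.".toList, "p.ej.".toList, "etc.".toList]

-- the for-loop of A: buf is the accumulated prefix, i the current index, rest = s.drop i
def fmsA_go (s : List Char) : Nat → List Char → List Char → List Char
  | _, _, [] => PySem.Chars.strip s
  | i, buf, ch :: rs =>
    let buf' := buf ++ [ch]
    if ch ∈ ['.', '!', '?'] then
      let frag := PySem.Chars.strip buf'
      let tail := PySem.Chars.lower (PySem.Chars.strip
                    (PySem.List.slice s (some ((i : Int) + 1)) (some ((i : Int) + 3))))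
      let last := if PySem.Chars.split₀ frag = [] then []
                  else (PySem.List.pyGet? (PySem.Chars.split₀ (PySem.Chars.lower frag)) (-1)).getD []
      if last ∈ fmsABBR then fmsA_go s (i + 1) buf' rs
      else if ch = '.' ∧ PySem.Chars.strIsdigit (PySem.List.slice tail none (some 1)) = true then
        fmsA_go s (i + 1) buf' rs
      else frag
    else fmsA_go s (i + 1) buf' rs

def first_meaningful_sentence_py (s : String) : String :=
  if s.toList = [] then s
  else String.mk (fmsA_go s.toList 0 [] s.toList)

-- ===== PORT B =====

-- the inner `for c in s[i+1:i+3]: … break` loop of B: first non-whitespace char, if any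
def fmsB_first : List Char → Option Char
  | [] => none
  | c :: cs => if PySem.Chars.isspace c then fmsB_first cs else some c

-- the single pass of B: word is the current lowercased token, rest = s.drop i
def fmsB_go (s : List Char) : Nat → List Char → List Char → List Char
  | _, _, [] => PySem.Chars.strip s
  | i, word, ch :: rs =>
    let word' := if PySem.Chars.isspace ch then [] else word ++ [PySem.Chars.lowerChar ch]
    if ch ∈ ['.', '!', '?'] then
      if word' ∈ fmsABBR then fmsB_go s (i + 1) word' rs
      else if ch = '.' ∧ (match fmsB_first (PySem.List.slice s (some ((i : Int) + 1)) (some ((i : Int) + 3))) with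
                          | some c => PySem.Chars.isdigit c
                          | none => false) = true then
        fmsB_go s (i + 1) word' rs
      else PySem.Chars.strip (s.take (i + 1))
    else fmsB_go s (i + 1) word' rs

def first_meaningful_sentence_py_alt (s : String) : String :=
  String.mk (fmsB_go s.toList 0 [] s.toList)

-- ===== PRECONDITION & SPEC =====
def Spec_first_meaningful_sentence_py (s : String) (out : String) : Prop := out = first_meaningful_sentence_py_alt s
instance (s : String) (out : String) : Decidable (Spec_first_meaningful_sentence_py s out) := by unfold Spec_first_meaningful_sentence_py; infer_instance

-- ===== CLAIM (what is proved, stated in full; the proofs are below) =====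
def Claim_equal_first_meaningful_sentence_py : Prop := ∀ (s : String), Dom_first_meaningful_sentence_py s → Spec_first_meaningful_sentence_py s (first_meaningful_sentence_py s)

-- ===== LEMMAS AND PROOFS =====

-- B's incremental token: the lowercased chars since the last whitespace
def fmsLowtok (p : List Char) : List Char :=
  p.foldl (fun w c => if PySem.Chars.isspace c then [] else w ++ [PySem.Chars.lowerChar c]) []

theorem fms_lowtok_append (p q : List Char) :
    fmsLowtok (p ++ q) = q.foldl (fun w c => if PySem.Chars.isspace c then [] else w ++ [PySem.Chars.lowerChar c]) (fmsLowtok p) := by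
  simp [fmsLowtok, List.foldl_append]

theorem fms_lowerChar_toNat (c : Char) (h : PySem.Chars.isupper c = true) :
    (PySem.Chars.lowerChar c).toNat = c.toNat + 32 ∧ 65 ≤ c.toNat ∧ c.toNat ≤ 90 := by
  have h' := h
  simp only [PySem.Chars.isupper, Bool.and_eq_true, decide_eq_true_eq, Char.le_def] at h'
  have hb1 : 65 ≤ c.toNat := by
    have h1 := UInt32.le_iff_toNat_le.mp h'.1
    have e : 'A'.val.toNat = 65 := by decide
    rw [e] at h1; exact h1
  have hb2 : c.toNat ≤ 90 := by
    have h1 := UInt32.le_iff_toNat_le.mp h'.2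
    have e : 'Z'.val.toNat = 90 := by decide
    rw [e] at h1; exact h1
  have hv : (c.toNat + 32).isValidChar := by left; omega
  refine ⟨?_, hb1, hb2⟩
  rw [PySem.Chars.lowerChar, if_pos h]
  unfold Char.ofNat
  split
  · rfl
  · next hn => exact absurd hv hn

theorem fms_isspace_false (d : Char) (h1 : 65 ≤ d.toNat) (h2 : d.toNat ≤ 122) :
    PySem.Chars.isspace d = false := by
  unfold PySem.Chars.isspace
  simp only [Bool.or_eq_false_iff, Bool.and_eq_false_iff, decide_eq_false_iff_not]
  omega

theorem fms_isdigit_false (d : Char) (h1 : 65 ≤ d.toNat) : PySem.Chars.isdigit d = false := by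
  simp only [PySem.Chars.isdigit, Bool.and_eq_false_iff]
  right
  simp only [decide_eq_false_iff_not, Char.le_def]
  intro hx
  have hy := UInt32.le_iff_toNat_le.mp hx
  have e : '9'.val.toNat = 57 := by decide
  rw [e] at hy
  have : d.toNat ≤ 57 := hy
  omega

theorem fms_isspace_lowerChar (c : Char) : PySem.Chars.isspace (PySem.Chars.lowerChar c) = PySem.Chars.isspace c := by
  by_cases h : PySem.Chars.isupper c = true
  · obtain ⟨h1, h2, h3⟩ := fms_lowerChar_toNat c h
    rw [fms_isspace_false c h2 (by omega), fms_isspace_false _ (by omega) (by omega)]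
  · simp [PySem.Chars.lowerChar, h]

theorem fms_isdigit_lowerChar (c : Char) : PySem.Chars.isdigit (PySem.Chars.lowerChar c) = PySem.Chars.isdigit c := by
  by_cases h : PySem.Chars.isupper c = true
  · obtain ⟨h1, h2, h3⟩ := fms_lowerChar_toNat c h
    rw [fms_isdigit_false c h2, fms_isdigit_false _ (by omega)]
  · simp [PySem.Chars.lowerChar, h]

-- dropping trailing whitespace leaves a list ending in a non-space char unchanged at the front
theorem fms_rstrip_cons (c : Char) (r : List Char) (h : PySem.Chars.isspace c = false) :
    PySem.Chars.rstrip (c :: r) = c :: PySem.Chars.rstrip r := by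
  simp only [PySem.Chars.rstrip, List.reverse_cons, List.dropWhile_append]
  split
  · next he =>
    rw [List.isEmpty_iff] at he
    rw [he]
    simp [List.dropWhile_cons, h]
  · simp

theorem fms_strip_concat (t : List Char) (ch : Char) (h : PySem.Chars.isspace ch = false) :
    PySem.Chars.strip (t ++ [ch]) = t.dropWhile PySem.Chars.isspace ++ [ch] := by
  have hl : PySem.Chars.lstrip (t ++ [ch]) = t.dropWhile PySem.Chars.isspace ++ [ch] := by
    simp only [PySem.Chars.lstrip, List.dropWhile_append]
    split
    · next he =>
      rw [List.isEmpty_iff] at he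
      rw [he]
      simp [List.dropWhile_cons, h]
    · rfl
  rw [PySem.Chars.strip, hl]
  simp only [PySem.Chars.rstrip, List.reverse_append, List.reverse_cons, List.reverse_nil,
    List.nil_append, List.singleton_append, List.dropWhile_cons, h]
  simp

-- the head of dropWhile satisfies the negated predicate
theorem fms_dropWhile_head (p : Char → Bool) (l : List Char) (c : Char) (r : List Char)
    (h : l.dropWhile p = c :: r) : p c = false := by
  induction l with
  | nil => simp at h
  | cons a t ih =>
    rw [List.dropWhile_cons] at h
    split at h
    · exact ih h
    · next hp => cases h; simpa using hp

-- reversed-token accumulator matching split₀.go's `cur`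
def fmsRtok (cur : List Char) (p : List Char) : List Char :=
  p.foldl (fun w c => if PySem.Chars.isspace c then [] else c :: w) cur

theorem fms_rtok_reverse (p : List Char) : ∀ cur : List Char,
    (fmsRtok cur p).reverse = p.foldl (fun w c => if PySem.Chars.isspace c then [] else w ++ [c]) cur.reverse := by
  induction p with
  | nil => intro cur; simp [fmsRtok]
  | cons c r ih =>
    intro cur
    simp only [fmsRtok, List.foldl_cons] at *
    by_cases h : PySem.Chars.isspace c = true
    · simpa [h] using ih []
    · simpa [h] using ih (c :: cur)

theorem fms_split0_go_concat (u : List Char) (ch : Char) (h : PySem.Chars.isspace ch = false) :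
    ∀ (cur : List Char) (acc : List (List Char)),
      (PySem.Chars.split₀.go (u ++ [ch]) cur acc).getLast? = some (fmsRtok cur (u ++ [ch])).reverse := by
  induction u with
  | nil =>
    intro cur acc
    simp [PySem.Chars.split₀.go, h, fmsRtok]
  | cons c r ih =>
    intro cur acc
    simp only [List.cons_append, PySem.Chars.split₀.go]
    by_cases hc : PySem.Chars.isspace c = true
    · simp only [hc, if_true]
      have : fmsRtok cur (c :: (r ++ [ch])) = fmsRtok [] (r ++ [ch]) := by
        simp [fmsRtok, hc]
      rw [this]
      split
      · exact ih [] acc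
      · exact ih [] _
    · simp only [hc, if_false]
      have : fmsRtok cur (c :: (r ++ [ch])) = fmsRtok (c :: cur) (r ++ [ch]) := by
        simp [fmsRtok, hc]
      rw [this]
      exact ih (c :: cur) acc

theorem fms_split0_concat_getLast (u : List Char) (ch : Char) (h : PySem.Chars.isspace ch = false) :
    (PySem.Chars.split₀ (u ++ [ch])).getLast? = some (fmsRtok [] (u ++ [ch])).reverse := by
  exact fms_split0_go_concat u ch h [] []

theorem fms_split0_concat_ne_nil (u : List Char) (ch : Char) (h : PySem.Chars.isspace ch = false) :
    PySem.Chars.split₀ (u ++ [ch]) ≠ [] := by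
  intro hx
  have := fms_split0_concat_getLast u ch h
  rw [hx] at this
  simp at this

theorem fms_pyGet_neg_one {α : Type} (xs : List α) : PySem.List.pyGet? xs (-1) = xs.getLast? := by
  cases xs with
  | nil => simp [PySem.List.pyGet?, PySem.List.pyIdx?]
  | cons a l =>
    have h1 : PySem.List.pyIdx? (l.length + 1) (-1) = some l.length := by
      simp only [PySem.List.pyIdx?]
      norm_num
    simp [PySem.List.pyGet?, List.length_cons, h1, List.getLast?_eq_getElem?]

-- the lowered-last-token of the stripped prefix IS B's incremental token
theorem fms_last_eq_lowtok (t : List Char) (ch : Char) (h : PySem.Chars.isspace ch = false) :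
    (PySem.List.pyGet? (PySem.Chars.split₀ (PySem.Chars.lower (PySem.Chars.strip (t ++ [ch])))) (-1)).getD []
      = fmsLowtok (t ++ [ch]) := by
  rw [fms_strip_concat t ch h]
  have hlow : PySem.Chars.lower (t.dropWhile PySem.Chars.isspace ++ [ch])
      = PySem.Chars.lower (t.dropWhile PySem.Chars.isspace) ++ [PySem.Chars.lowerChar ch] := by
    simp [PySem.Chars.lower]
  rw [hlow, fms_pyGet_neg_one,
    fms_split0_concat_getLast _ _ (by rw [fms_isspace_lowerChar]; exact h)]
  rw [Option.getD_some, fms_rtok_reverse]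
  rw [show (PySem.Chars.lower (t.dropWhile PySem.Chars.isspace) ++ [PySem.Chars.lowerChar ch])
        = PySem.Chars.lower (t.dropWhile PySem.Chars.isspace ++ [ch]) from hlow.symm]
  -- fold over a lowered list = fold with lowerChar applied pointwise
  have hfold : ∀ q : List Char,
      (PySem.Chars.lower q).foldl (fun w c => if PySem.Chars.isspace c then [] else w ++ [c]) ([] : List Char).reverse
        = fmsLowtok q := by
    intro q
    simp only [PySem.Chars.lower, List.foldl_map, fmsLowtok, List.reverse_nil]
    have hf : (fun (x : List Char) (y : Char) =>
          if PySem.Chars.isspace (PySem.Chars.lowerChar y) then [] else x ++ [PySem.Chars.lowerChar y])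
        = (fun (x : List Char) (y : Char) =>
          if PySem.Chars.isspace y then [] else x ++ [PySem.Chars.lowerChar y]) := by
      funext x y
      rw [fms_isspace_lowerChar]
    rw [hf]
  rw [hfold]
  -- leading whitespace does not change the incremental token
  have hdw : ∀ t' : List Char, fmsLowtok (t'.dropWhile PySem.Chars.isspace) = fmsLowtok t' := by
    intro t'
    induction t' with
    | nil => simp
    | cons c r ih =>
      by_cases hc : PySem.Chars.isspace c = true
      · rw [List.dropWhile_cons_of_pos hc, ih]
        simp [fmsLowtok, hc]
      · rw [List.dropWhile_cons_of_neg (by simp [hc])]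
  rw [fms_lowtok_append, fms_lowtok_append]
  simp [hdw t]

-- B's first-non-space loop = head of dropWhile
theorem fms_first_eq (l : List Char) : fmsB_first l = (l.dropWhile PySem.Chars.isspace).head? := by
  induction l with
  | nil => simp [fmsB_first]
  | cons c r ih =>
    by_cases h : PySem.Chars.isspace c = true
    · simp [fmsB_first, h, List.dropWhile_cons, ih]
    · simp [fmsB_first, h, List.dropWhile_cons]

-- A's tail[:1].isdigit() test = B's first-non-space-digit test (same slice seg)
theorem fms_tail_eq (seg : List Char) :
    PySem.Chars.strIsdigit (PySem.List.slice (PySem.Chars.lower (PySem.Chars.strip seg)) none (some 1))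
      = (match fmsB_first seg with
         | some c => PySem.Chars.isdigit c
         | none => false) := by
  rw [fms_first_eq]
  cases hx : seg.dropWhile PySem.Chars.isspace with
  | nil =>
    have : PySem.Chars.strip seg = [] := by
      simp [PySem.Chars.strip, PySem.Chars.lstrip, hx, PySem.Chars.rstrip]
    simp [this, PySem.Chars.lower, PySem.List.slice, PySem.List.clampIdx, PySem.Chars.strIsdigit]
  | cons c r =>
    have hc : PySem.Chars.isspace c = false := fms_dropWhile_head _ _ _ _ hx
    have hstrip : PySem.Chars.strip seg = c :: PySem.Chars.rstrip r := by
      simp only [PySem.Chars.strip, PySem.Chars.lstrip, hx]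
      exact fms_rstrip_cons c r hc
    rw [hstrip]
    simp only [PySem.Chars.lower, List.map_cons]
    simp [PySem.List.slice, PySem.List.clampIdx, PySem.Chars.strIsdigit, fms_isdigit_lowerChar]

theorem fms_delim_nonspace (ch : Char) (h : ch ∈ ['.', '!', '?']) : PySem.Chars.isspace ch = false := by
  simp at h
  rcases h with h | h | h <;> subst h <;> decide

-- main loop equivalence
theorem fms_go_eq (s : List Char) : ∀ (rest : List Char) (i : Nat),
    rest = s.drop i → i ≤ s.length →
    fmsA_go s i (s.take i) rest = fmsB_go s i (fmsLowtok (s.take i)) rest := by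
  intro rest
  induction rest with
  | nil => intro i _ _; simp [fmsA_go, fmsB_go]
  | cons ch rs ih =>
    intro i hrest hi
    have hig : s[i]? = some ch := by
      have h0 : (List.drop i s)[0]? = some ch := by rw [← hrest]; rfl
      rw [List.getElem?_drop] at h0
      simpa using h0
    have hlen : i < s.length := by
      by_contra hx
      rw [List.getElem?_eq_none (by omega)] at hig
      simp at hig
    have htake : s.take (i + 1) = s.take i ++ [ch] := by
      rw [List.take_succ, hig]
      rfl
    have hrs : rs = s.drop (i + 1) := by
      have h0 : (ch :: rs).tail = (s.drop i).tail := by rw [hrest]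
      simpa [List.tail_drop] using h0
    have hrec := ih (i + 1) hrs (by omega)
    rw [htake] at hrec
    by_cases hd : ch ∈ ['.', '!', '?']
    · have hsp : PySem.Chars.isspace ch = false := fms_delim_nonspace ch hd
      have hword : (if PySem.Chars.isspace ch then [] else fmsLowtok (s.take i) ++ [PySem.Chars.lowerChar ch])
          = fmsLowtok (s.take i ++ [ch]) := by
        rw [fms_lowtok_append]
        simp [hsp]
      have hlast : (if PySem.Chars.split₀ (PySem.Chars.strip (s.take i ++ [ch])) = [] then []
            else (PySem.List.pyGet? (PySem.Chars.split₀ (PySem.Chars.lower (PySem.Chars.strip (s.take i ++ [ch])))) (-1)).getD [])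
          = fmsLowtok (s.take i ++ [ch]) := by
        rw [if_neg (by rw [fms_strip_concat _ _ hsp]; exact fms_split0_concat_ne_nil _ _ hsp)]
        exact fms_last_eq_lowtok _ _ hsp
      simp only [fmsA_go, fmsB_go, if_pos hd, htake]
      rw [hlast, hword, fms_tail_eq]
      split_ifs with h1 h2
      · exact hrec
      · exact hrec
      · rfl
    · simp only [fmsA_go, fmsB_go, if_neg hd]
      have hword : (if PySem.Chars.isspace ch then [] else fmsLowtok (s.take i) ++ [PySem.Chars.lowerChar ch])
          = fmsLowtok (s.take i ++ [ch]) := by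
        rw [fms_lowtok_append]
        by_cases h : PySem.Chars.isspace ch = true <;> simp [h]
      rw [hword]
      exact hrec

-- ===== VERDICT (by name: the statement is the Claim_ definition above) =====
theorem first_meaningful_sentence_py_spec : Claim_equal_first_meaningful_sentence_py := by
  intro s _
  unfold Spec_first_meaningful_sentence_py first_meaningful_sentence_py first_meaningful_sentence_py_alt
  by_cases h : s.toList = []
  · rw [if_pos h]
    have hs : s = "" := String.toList_eq_nil_iff.mp h
    subst hs
    rw [h]
    rfl
  · rw [if_neg h]
    have := fms_go_eq s.toList s.toList 0 (by simp) (by omega)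
    simp only [List.take_zero] at this
    rw [this]
    rfl
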